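-- pv_equiv track=rewrite | github.com/Irfanul1925021/.LogLite. | app.py | extract_key_indicators
-- ===== SOURCE A (Python) =====
-- from collections import Counter
--
-- def extract_key_indicators(log_text):
--     # Enhanced keyword extraction with weighted importance
--     important_words = {
--         'high': ['error', 'fail', 'crash', 'exception', 'panic', 'corrupt'],
--         'medium': ['warning', 'interrupt', 'memory', 'disk', 'network', 'timeout'],
--         'low': ['process', 'terminated', 'overflow', 'retry', 'delay']
--     }
--
--     tokens = log_text.lower().split()
--     indicators = []
--     word_scores = {}
--
--     # Score each word based on importance
--     for word in tokens:
--         if any(word in important_words['high'] or imp_word in word for imp_word in important_words['high']):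
--             word_scores[word] = 3
--         elif any(word in important_words['medium'] or imp_word in word for imp_word in important_words['medium']):
--             word_scores[word] = 2
--         elif any(word in important_words['low'] or imp_word in word for imp_word in important_words['low']):
--             word_scores[word] = 1
--
--     # Sort by score and get top indicators
--     indicators = [word for word, _ in sorted(word_scores.items(), key=lambda x: x[1], reverse=True)]
--
--     # If no indicators found, return most unique words
--     if not indicators:
--         word_freq = Counter(tokens)
--         indicators = [word for word, freq in word_freq.most_common(3) if len(word) > 3]
--
--     return indicators[:3]  # Return top 3 indicators
-- ===== SOURCE B (Python) =====
-- from collections import Counter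
--
-- HIGH = ['error', 'fail', 'crash', 'exception', 'panic', 'corrupt']
-- MEDIUM = ['warning', 'interrupt', 'memory', 'disk', 'network', 'timeout']
-- LOW = ['process', 'terminated', 'overflow', 'retry', 'delay']
--
-- def _tier_hit(word, keywords):
--     return word in keywords or any(kw in word for kw in keywords)
--
-- def extract_key_indicators(log_text):
--     tokens = log_text.lower().split()
--     seen = set()
--     bucket_high, bucket_medium, bucket_low = [], [], []
--     # one pass: each distinct word goes (in first-seen order) into its tier bucket
--     for word in tokens:
--         if word in seen:
--             continue
--         seen.add(word)
--         if _tier_hit(word, HIGH):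
--             bucket_high.append(word)
--         elif _tier_hit(word, MEDIUM):
--             bucket_medium.append(word)
--         elif _tier_hit(word, LOW):
--             bucket_low.append(word)
--     indicators = bucket_high + bucket_medium + bucket_low
--     if not indicators:
--         word_freq = Counter(tokens)
--         indicators = [word for word, freq in word_freq.most_common(3) if len(word) > 3]
--     return indicators[:3]
-- ===== Notes on version B (the rewrite author's own statement) =====
-- stated objective: simpler
-- what changed: B drops A's score dictionary and stable reverse sort: one pass appends each first-seen word into one of three tier buckets (high/medium/low) and concatenates them, which reproduces A's stable sort-by-score order; the Counter fallback is kept identical.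
import Mathlib
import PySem

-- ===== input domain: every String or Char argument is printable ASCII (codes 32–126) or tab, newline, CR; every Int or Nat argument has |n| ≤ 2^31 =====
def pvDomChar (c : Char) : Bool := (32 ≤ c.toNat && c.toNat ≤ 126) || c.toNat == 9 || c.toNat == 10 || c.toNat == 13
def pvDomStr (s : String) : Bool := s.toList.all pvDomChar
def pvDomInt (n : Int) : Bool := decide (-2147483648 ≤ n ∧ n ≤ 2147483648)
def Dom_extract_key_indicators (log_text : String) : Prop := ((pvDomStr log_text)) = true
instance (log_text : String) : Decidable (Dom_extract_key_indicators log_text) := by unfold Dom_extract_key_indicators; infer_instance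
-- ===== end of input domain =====

-- B replaces A's score-dict + stable reverse sort by three first-seen-order tier buckets
-- concatenated high→medium→low (no sort on the main path); objective: simpler.

-- ===== PORT A =====
def pvHigh : List String := ["error", "fail", "crash", "exception", "panic", "corrupt"]
def pvMedium : List String := ["warning", "interrupt", "memory", "disk", "network", "timeout"]
def pvLow : List String := ["process", "terminated", "overflow", "retry", "delay"]

-- A's test: any(word in kws or imp_word in word for imp_word in kws)
def pvAnyImp (kws : List String) (word : String) : Bool :=
  kws.any (fun imp => kws.contains word || PySem.Str.isIn imp word)

def extract_key_indicators (log_text : String) : List String :=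
  let tokens := PySem.Str.split₀ (PySem.Str.lower log_text)
  let word_scores : PySem.Dict String Int :=
    tokens.foldl (fun d word =>
      if pvAnyImp pvHigh word then d.insert word 3
      else if pvAnyImp pvMedium word then d.insert word 2
      else if pvAnyImp pvLow word then d.insert word 1
      else d) PySem.Dict.empty
  let indicators :=
    (PySem.List.sorted word_scores.items (fun x => x.2) true).map (fun x => x.1)
  let indicators :=
    if indicators = [] then
      -- Counter(tokens).most_common(3) = stable reverse sort of items by count, take 3
      (((PySem.List.sorted (PySem.Dict.counter tokens).items (fun x => x.2) true).take 3).filter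
        (fun p => decide (3 < PySem.Str.len p.1))).map (fun p => p.1)
    else indicators
  indicators.take 3

-- ===== PORT B =====
-- B's test: word in keywords or any(kw in word for kw in keywords)
def pvTierHit (word : String) (keywords : List String) : Bool :=
  keywords.contains word || keywords.any (fun kw => PySem.Str.isIn kw word)

def extract_key_indicators_alt (log_text : String) : List String :=
  let tokens := PySem.Str.split₀ (PySem.Str.lower log_text)
  let st := tokens.foldl
    (fun (st : PySem.Set String × List String × List String × List String) word =>
      if PySem.Set.contains st.1 word then st
      else
        let seen := PySem.Set.add st.1 word
        if pvTierHit word pvHigh then (seen, st.2.1 ++ [word], st.2.2.1, st.2.2.2)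
        else if pvTierHit word pvMedium then (seen, st.2.1, st.2.2.1 ++ [word], st.2.2.2)
        else if pvTierHit word pvLow then (seen, st.2.1, st.2.2.1, st.2.2.2 ++ [word])
        else (seen, st.2.1, st.2.2.1, st.2.2.2))
    (PySem.Set.empty, [], [], [])
  let indicators := st.2.1 ++ st.2.2.1 ++ st.2.2.2
  let indicators :=
    if indicators = [] then
      (((PySem.List.sorted (PySem.Dict.counter tokens).items (fun x => x.2) true).take 3).filter
        (fun p => decide (3 < PySem.Str.len p.1))).map (fun p => p.1)
    else indicators
  indicators.take 3

-- ===== PRECONDITION & SPEC =====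
def Spec_extract_key_indicators (log_text : String) (out : List String) : Prop := out = extract_key_indicators_alt log_text
instance (log_text : String) (out : List String) : Decidable (Spec_extract_key_indicators log_text out) := by unfold Spec_extract_key_indicators; infer_instance

-- ===== CLAIM (what is proved, stated in full; the proofs are below) =====
def Claim_equal_extract_key_indicators : Prop := ∀ (log_text : String), Dom_extract_key_indicators log_text → Spec_extract_key_indicators log_text (extract_key_indicators log_text)

-- ===== LEMMAS AND PROOFS =====

-- the scoring function both loops implement per word
def pvScore (w : String) : Option Int :=
  if pvAnyImp pvHigh w then some 3
  else if pvAnyImp pvMedium w then some 2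
  else if pvAnyImp pvLow w then some 1
  else none

lemma pvScore_cases (w : String) (s : Int) (h : pvScore w = some s) :
    s = 3 ∨ s = 2 ∨ s = 1 := by
  unfold pvScore at h; split_ifs at h <;> simp_all

-- A's per-imp_word disjunct factors into B's test (keywords nonempty)
lemma pvAnyImp_eq_tierHit (kws : List String) (h : kws ≠ []) (w : String) :
    pvAnyImp kws w = pvTierHit w kws := by
  unfold pvAnyImp pvTierHit
  cases hc : kws.contains w <;> cases kws <;> simp_all

-- invariant linking A's dict with B's (seen, buckets) state
def pvInv (d : PySem.Dict String Int) (st : PySem.Set String × List String × List String × List String) : Prop :=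
  (∀ p ∈ d.items, pvScore p.1 = some p.2) ∧
  (∀ w ∈ st.1, ∀ s : Int, pvScore w = some s → d.contains w = true) ∧
  (∀ w, d.contains w = true → w ∈ st.1) ∧
  d.items.filter (fun p => p.2 == 3) = st.2.1.map (fun w => (w, (3 : Int))) ∧
  d.items.filter (fun p => p.2 == 2) = st.2.2.1.map (fun w => (w, (2 : Int))) ∧
  d.items.filter (fun p => p.2 == 1) = st.2.2.2.map (fun w => (w, (1 : Int)))

def pvStepA (d : PySem.Dict String Int) (word : String) : PySem.Dict String Int :=
  if pvAnyImp pvHigh word then d.insert word 3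
  else if pvAnyImp pvMedium word then d.insert word 2
  else if pvAnyImp pvLow word then d.insert word 1
  else d

def pvStepB (st : PySem.Set String × List String × List String × List String) (word : String) :
    PySem.Set String × List String × List String × List String :=
  if PySem.Set.contains st.1 word then st
  else
    let seen := PySem.Set.add st.1 word
    if pvTierHit word pvHigh then (seen, st.2.1 ++ [word], st.2.2.1, st.2.2.2)
    else if pvTierHit word pvMedium then (seen, st.2.1, st.2.2.1 ++ [word], st.2.2.2)
    else if pvTierHit word pvLow then (seen, st.2.1, st.2.2.1, st.2.2.2 ++ [word])
    else (seen, st.2.1, st.2.2.1, st.2.2.2)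

-- re-inserting a word at its (deterministic) score leaves the dict unchanged
lemma pvInsert_same (d : PySem.Dict String Int) (w : String) (s : Int)
    (hc : d.contains w = true)
    (h1 : ∀ p ∈ d.items, pvScore p.1 = some p.2) (hs : pvScore w = some s) :
    d.insert w s = d := by
  apply PySem.Dict.ext
  rw [PySem.Dict.items_insert_of_contains d s hc]
  have he : ∀ p ∈ d.items, (if (p.1 == w) = true then (w, s) else p) = p := by
    intro p hp
    by_cases hpw : p.1 = w
    · have h2 := h1 p hp
      rw [hpw, hs] at h2
      have hv : s = p.2 := by injection h2
      subst hv
      simp [← hpw]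
    · simp [hpw]
  calc List.map (fun p => if (p.1 == w) = true then (w, s) else p) d.items
      = List.map id d.items := List.map_congr_left he
    _ = d.items := List.map_id d.items

lemma pvStep_preserve (d : PySem.Dict String Int) st (word : String) (h : pvInv d st) :
    pvInv (pvStepA d word) (pvStepB st word) := by
  obtain ⟨h1, h2, h3, hf3, hf2, hf1⟩ := h
  have e3 : pvTierHit word pvHigh = pvAnyImp pvHigh word :=
    (pvAnyImp_eq_tierHit pvHigh (by simp [pvHigh]) word).symm
  have e2 : pvTierHit word pvMedium = pvAnyImp pvMedium word :=
    (pvAnyImp_eq_tierHit pvMedium (by simp [pvMedium]) word).symm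
  have e1 : pvTierHit word pvLow = pvAnyImp pvLow word :=
    (pvAnyImp_eq_tierHit pvLow (by simp [pvLow]) word).symm
  by_cases hseen : word ∈ st.1
  · have hsc : PySem.Set.contains st.1 word = true := by
      simpa [PySem.Set.contains] using hseen
    have hB : pvStepB st word = st := by unfold pvStepB; rw [if_pos hsc]
    rw [hB]
    have hA : pvStepA d word = d := by
      unfold pvStepA
      by_cases c3 : pvAnyImp pvHigh word = true
      · rw [if_pos c3]
        exact pvInsert_same d word 3 (h2 word hseen 3 (by unfold pvScore; rw [if_pos c3]))
          h1 (by unfold pvScore; rw [if_pos c3])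
      · rw [if_neg c3]
        by_cases c2 : pvAnyImp pvMedium word = true
        · rw [if_pos c2]
          exact pvInsert_same d word 2
            (h2 word hseen 2 (by unfold pvScore; rw [if_neg c3, if_pos c2]))
            h1 (by unfold pvScore; rw [if_neg c3, if_pos c2])
        · rw [if_neg c2]
          by_cases c1 : pvAnyImp pvLow word = true
          · rw [if_pos c1]
            exact pvInsert_same d word 1
              (h2 word hseen 1 (by unfold pvScore; rw [if_neg c3, if_neg c2, if_pos c1]))
              h1 (by unfold pvScore; rw [if_neg c3, if_neg c2, if_pos c1])
          · rw [if_neg c1]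
    rw [hA]
    exact ⟨h1, h2, h3, hf3, hf2, hf1⟩
  · have hsc : PySem.Set.contains st.1 word = false := by
      cases hc : PySem.Set.contains st.1 word
      · rfl
      · exact absurd (by simpa [PySem.Set.contains] using hc) hseen
    have hdc : d.contains word = false := by
      cases hc : d.contains word
      · rfl
      · exact absurd (h3 word hc) hseen
    -- the generic not-yet-seen, score-s insertion step
    have key : ∀ s : Int, pvScore word = some s →
        ∀ bh' bm' bl', st.2.1 ++ (if s = 3 then [word] else []) = bh' →
        st.2.2.1 ++ (if s = 2 then [word] else []) = bm' →
        st.2.2.2 ++ (if s = 1 then [word] else []) = bl' →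
        pvInv (d.insert word s) (st.1.add word, bh', bm', bl') := by
      intro s hs bh' bm' bl' hbh hbm hbl
      have hit := PySem.Dict.items_insert_of_not_contains d s hdc
      have hsv := pvScore_cases word s hs
      refine ⟨?_, ?_, ?_, ?_, ?_, ?_⟩
      · intro p hp
        rcases (PySem.Dict.mem_items_insert d word s p).mp hp with hpe | ⟨hpm, _⟩
        · rw [hpe]; exact hs
        · exact h1 p hpm
      · intro w hw s' hsw
        rcases (PySem.Set.mem_add st.1 word w).mp hw with hm | hm
        · rw [PySem.Dict.contains_insert]
          simp [h2 w hm s' hsw]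
        · rw [hm, PySem.Dict.contains_insert]; simp
      · intro w hw
        rw [PySem.Dict.contains_insert] at hw
        rcases Bool.or_eq_true_iff.mp hw with hm | hm
        · exact (PySem.Set.mem_add st.1 word w).mpr (Or.inr (by simpa using hm))
        · exact (PySem.Set.mem_add st.1 word w).mpr (Or.inl (h3 w hm))
      · show ((d.insert word s).items.filter _) = _
        rw [hit, List.filter_append, hf3, ← hbh]
        rcases hsv with hv | hv | hv <;> simp [hv]
      · show ((d.insert word s).items.filter _) = _
        rw [hit, List.filter_append, hf2, ← hbm]
        rcases hsv with hv | hv | hv <;> simp [hv]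
      · show ((d.insert word s).items.filter _) = _
        rw [hit, List.filter_append, hf1, ← hbl]
        rcases hsv with hv | hv | hv <;> simp [hv]
    by_cases c3 : pvAnyImp pvHigh word = true
    · have hA : pvStepA d word = d.insert word 3 := by unfold pvStepA; rw [if_pos c3]
      have hB : pvStepB st word = (st.1.add word, st.2.1 ++ [word], st.2.2.1, st.2.2.2) := by
        unfold pvStepB
        rw [e3, if_neg (show ¬ PySem.Set.contains st.1 word = true by simpa using hseen), if_pos c3]
      rw [hA, hB]
      exact key 3 (by unfold pvScore; rw [if_pos c3]) _ _ _ (by simp) (by simp) (by simp)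
    · by_cases c2 : pvAnyImp pvMedium word = true
      · have hA : pvStepA d word = d.insert word 2 := by
          unfold pvStepA; rw [if_neg c3, if_pos c2]
        have hB : pvStepB st word = (st.1.add word, st.2.1, st.2.2.1 ++ [word], st.2.2.2) := by
          unfold pvStepB
          rw [e3, e2, if_neg (show ¬ PySem.Set.contains st.1 word = true by simpa using hseen),
            if_neg c3, if_pos c2]
        rw [hA, hB]
        exact key 2 (by unfold pvScore; rw [if_neg c3, if_pos c2]) _ _ _
          (by simp) (by simp) (by simp)
      · by_cases c1 : pvAnyImp pvLow word = true
        · have hA : pvStepA d word = d.insert word 1 := by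
            unfold pvStepA; rw [if_neg c3, if_neg c2, if_pos c1]
          have hB : pvStepB st word = (st.1.add word, st.2.1, st.2.2.1, st.2.2.2 ++ [word]) := by
            unfold pvStepB
            rw [e3, e2, e1, if_neg (show ¬ PySem.Set.contains st.1 word = true by simpa using hseen),
              if_neg c3, if_neg c2, if_pos c1]
          rw [hA, hB]
          exact key 1 (by unfold pvScore; rw [if_neg c3, if_neg c2, if_pos c1]) _ _ _
            (by simp) (by simp) (by simp)
        · have hA : pvStepA d word = d := by
            unfold pvStepA; rw [if_neg c3, if_neg c2, if_neg c1]
          have hB : pvStepB st word = (st.1.add word, st.2.1, st.2.2.1, st.2.2.2) := by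
            unfold pvStepB
            rw [e3, e2, e1, if_neg (show ¬ PySem.Set.contains st.1 word = true by simpa using hseen),
              if_neg c3, if_neg c2, if_neg c1]
          rw [hA, hB]
          have hnone : pvScore word = none := by
            unfold pvScore; rw [if_neg c3, if_neg c2, if_neg c1]
          refine ⟨h1, ?_, ?_, hf3, hf2, hf1⟩
          · intro w hw s hsw
            rcases (PySem.Set.mem_add st.1 word w).mp hw with hm | hm
            · exact h2 w hm s hsw
            · rw [hm, hnone] at hsw; cases hsw
          · intro w hw
            exact (PySem.Set.mem_add st.1 word w).mpr (Or.inl (h3 w hw))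

lemma pvFold_preserve (tokens : List String) :
    ∀ d st, pvInv d st → pvInv (tokens.foldl pvStepA d) (tokens.foldl pvStepB st) := by
  induction tokens with
  | nil => intro d st h; exact h
  | cons w t ih => intro d st h; exact ih _ _ (pvStep_preserve d st w h)

-- insertBy walks past a block it does not go before
lemma pvInsertBy_skip (before : String × Int → String × Int → Bool) (x : String × Int)
    (a : List (String × Int)) (h : ∀ y ∈ a, before x y = false) (l : List (String × Int)) :
    PySem.List.insertBy before x (a ++ l) = a ++ PySem.List.insertBy before x l := by
  induction a with
  | nil => simp
  | cons y t ih =>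
    have hy : before x y = false := h y (by simp)
    simp only [List.cons_append, PySem.List.insertBy, hy]
    simp [ih (fun z hz => h z (by simp [hz]))]

-- insertBy lands at the front of a block it goes before
lemma pvInsertBy_front (before : String × Int → String × Int → Bool) (x : String × Int)
    (l : List (String × Int)) (h : ∀ y ∈ l, before x y = true) :
    PySem.List.insertBy before x l = x :: l := by
  cases l with
  | nil => simp [PySem.List.insertBy]
  | cons y t => simp [PySem.List.insertBy, h y (by simp)]

-- one descending-by-score insertion into three concatenated tier blocks
lemma pvIns123 (x : String × Int) (hx : x.2 = 3 ∨ x.2 = 2 ∨ x.2 = 1)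
    (a b c : List (String × Int))
    (ha : ∀ p ∈ a, p.2 = 3) (hb : ∀ p ∈ b, p.2 = 2) (hc : ∀ p ∈ c, p.2 = 1) :
    PySem.List.insertBy (fun p q => decide (q.2 < p.2)) x (a ++ b ++ c) =
      if x.2 = 3 then (a ++ [x]) ++ b ++ c
      else if x.2 = 2 then a ++ (b ++ [x]) ++ c
      else a ++ b ++ (c ++ [x]) := by
  rcases hx with h | h | h
  · rw [if_pos h, List.append_assoc,
      pvInsertBy_skip _ _ a (fun y hy => by simp [ha y hy, h]) (b ++ c),
      pvInsertBy_front _ _ (b ++ c) (fun y hy => by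
        rcases List.mem_append.mp hy with hm | hm
        · simp [hb y hm, h]
        · simp [hc y hm, h])]
    simp
  · rw [if_neg (by omega), if_pos h, List.append_assoc,
      pvInsertBy_skip _ _ a (fun y hy => by simp [ha y hy, h]) (b ++ c),
      pvInsertBy_skip _ _ b (fun y hy => by simp [hb y hy, h]) c,
      pvInsertBy_front _ _ c (fun y hy => by simp [hc y hy, h])]
    simp
  · rw [if_neg (by omega), if_neg (by omega),
      PySem.List.insertBy_of_forall_not_before _ _ _ (fun y hy => by
        rcases List.mem_append.mp hy with hm | hm
        · rcases List.mem_append.mp hm with hm' | hm'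
          · simp [ha y hm', h]
          · simp [hb y hm', h]
        · simp [hc y hm, h])]
    simp

lemma pvFold123 (l : List (String × Int)) :
    ∀ a b c : List (String × Int),
    (∀ p ∈ l, p.2 = 3 ∨ p.2 = 2 ∨ p.2 = 1) →
    (∀ p ∈ a, p.2 = 3) → (∀ p ∈ b, p.2 = 2) → (∀ p ∈ c, p.2 = 1) →
    l.foldl (fun acc x => PySem.List.insertBy (fun p q => decide (q.2 < p.2)) x acc) (a ++ b ++ c) =
      (a ++ l.filter (fun p => p.2 == 3)) ++ (b ++ l.filter (fun p => p.2 == 2)) ++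
        (c ++ l.filter (fun p => p.2 == 1)) := by
  induction l with
  | nil => intro a b c _ _ _ _; simp
  | cons x t ih =>
    intro a b c hl ha hb hc
    have hx := hl x (by simp)
    rw [List.foldl_cons, pvIns123 x hx a b c ha hb hc]
    rcases hx with h | h | h
    · rw [if_pos h]
      have := ih (a ++ [x]) b c (fun p hp => hl p (by simp [hp]))
        (fun p hp => by rcases List.mem_append.mp hp with hm | hm
                        · exact ha p hm
                        · simp_all) hb hc
      rw [this]
      simp [h]
    · rw [if_neg (by omega), if_pos h]
      have := ih a (b ++ [x]) c (fun p hp => hl p (by simp [hp])) ha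
        (fun p hp => by rcases List.mem_append.mp hp with hm | hm
                        · exact hb p hm
                        · simp_all) hc
      rw [this]
      simp [h]
    · rw [if_neg (by omega), if_neg (by omega)]
      have := ih a b (c ++ [x]) (fun p hp => hl p (by simp [hp])) ha hb
        (fun p hp => by rcases List.mem_append.mp hp with hm | hm
                        · exact hc p hm
                        · simp_all)
      rw [this]
      simp [h]

-- stable reverse sort of a {3,2,1}-valued association list = tier filters concatenated
lemma pvSorted123 (l : List (String × Int))
    (hl : ∀ p ∈ l, p.2 = 3 ∨ p.2 = 2 ∨ p.2 = 1) :
    PySem.List.sorted l (fun x => x.2) true =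
      l.filter (fun p => p.2 == 3) ++ l.filter (fun p => p.2 == 2) ++ l.filter (fun p => p.2 == 1) := by
  rw [PySem.List.sorted_rev_eq_foldl_insertBy]
  exact pvFold123 l [] [] [] hl (by simp) (by simp) (by simp)

lemma pvMapFst (l : List String) (n : Int) :
    (l.map (fun w => (w, n))).map (fun x => x.1) = l := by
  induction l <;> simp_all

lemma pvFoldA_eq (tokens : List String) :
    tokens.foldl (fun d word =>
      if pvAnyImp pvHigh word then d.insert word 3
      else if pvAnyImp pvMedium word then d.insert word 2
      else if pvAnyImp pvLow word then d.insert word 1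
      else d) PySem.Dict.empty = tokens.foldl pvStepA PySem.Dict.empty := rfl

lemma pvFoldB_eq (tokens : List String) :
    tokens.foldl
      (fun (st : PySem.Set String × List String × List String × List String) word =>
        if PySem.Set.contains st.1 word then st
        else
          let seen := PySem.Set.add st.1 word
          if pvTierHit word pvHigh then (seen, st.2.1 ++ [word], st.2.2.1, st.2.2.2)
          else if pvTierHit word pvMedium then (seen, st.2.1, st.2.2.1 ++ [word], st.2.2.2)
          else if pvTierHit word pvLow then (seen, st.2.1, st.2.2.1, st.2.2.2 ++ [word])
          else (seen, st.2.1, st.2.2.1, st.2.2.2))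
      (PySem.Set.empty, [], [], []) = tokens.foldl pvStepB (PySem.Set.empty, [], [], []) := rfl

lemma pvInv_init : pvInv PySem.Dict.empty (PySem.Set.empty, [], [], []) := by
  refine ⟨?_, ?_, ?_, ?_, ?_, ?_⟩ <;>
    simp [PySem.Dict.empty, PySem.Set.empty, PySem.Dict.contains]

-- ===== VERDICT (by name: the statement is the Claim_ definition above) =====
theorem extract_key_indicators_spec : Claim_equal_extract_key_indicators := by
  intro log_text _
  show extract_key_indicators log_text = extract_key_indicators_alt log_text
  simp only [extract_key_indicators, extract_key_indicators_alt]
  rw [pvFoldA_eq, pvFoldB_eq]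
  obtain ⟨h1, h2, h3, hf3, hf2, hf1⟩ :=
    pvFold_preserve (PySem.Str.split₀ (PySem.Str.lower log_text)) PySem.Dict.empty
      (PySem.Set.empty, [], [], []) pvInv_init
  have hmap :
      (PySem.List.sorted
        ((PySem.Str.split₀ (PySem.Str.lower log_text)).foldl pvStepA PySem.Dict.empty).items
        (fun x => x.2) true).map (fun x => x.1) =
      ((PySem.Str.split₀ (PySem.Str.lower log_text)).foldl pvStepB
        (PySem.Set.empty, [], [], [])).2.1 ++
      ((PySem.Str.split₀ (PySem.Str.lower log_text)).foldl pvStepB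
        (PySem.Set.empty, [], [], [])).2.2.1 ++
      ((PySem.Str.split₀ (PySem.Str.lower log_text)).foldl pvStepB
        (PySem.Set.empty, [], [], [])).2.2.2 := by
    rw [pvSorted123 _ (fun p hp => pvScore_cases _ _ (h1 p hp)), hf3, hf2, hf1,
      List.map_append, List.map_append, pvMapFst, pvMapFst, pvMapFst]
  rw [hmap]
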